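-- pv_equiv track=rewrite | github.com/Svyatocheck/Optimization-Algos-Degustation | utill/optimization.py | check_shared_courses_schedule
-- ===== SOURCE A (Python) =====
-- def check_shared_courses_schedule(solution, shared_courses):
--     # Track the timeslot for each shared course
--     course_timeslots = {}
--
--     for curriculum_id, courses_schedule in solution.items():
--         for course_id, timeslots in courses_schedule:
--             if course_id in shared_courses:
--                 if course_id not in course_timeslots:
--                     course_timeslots[course_id] = set(timeslots)
--                 else:
--                     if set(timeslots) != course_timeslots[course_id]:
--                         return False  # Inconsistent scheduling for shared course
--
--     return True  # All shared courses are consistently scheduled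
-- ===== SOURCE B (Python) =====
-- def check_shared_courses_schedule(solution, shared_courses):
--     # Flatten to the stream of shared-course entries, then check consistency by
--     # a head-vs-rest recursion (pairwise comparison, no dict / first-seen state).
--     entries = [(c, set(ts))
--                for courses_schedule in solution.values()
--                for c, ts in courses_schedule
--                if c in shared_courses]
--     return _consistent(entries)
--
--
-- def _consistent(entries):
--     if not entries:
--         return True
--     (c0, s0), rest = entries[0], entries[1:]
--     return all(c != c0 or s == s0 for c, s in rest) and _consistent(rest)
-- ===== Notes on version B (the rewrite author's own statement) =====
-- stated objective: alternative
-- what changed: A scans once keeping a dict of first-seen timeslot sets and returns False mid-scan; B flattens the shared-course entries to one list and checks consistency by a head-vs-rest pairwise recursion with no dict at all.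
import Mathlib
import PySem

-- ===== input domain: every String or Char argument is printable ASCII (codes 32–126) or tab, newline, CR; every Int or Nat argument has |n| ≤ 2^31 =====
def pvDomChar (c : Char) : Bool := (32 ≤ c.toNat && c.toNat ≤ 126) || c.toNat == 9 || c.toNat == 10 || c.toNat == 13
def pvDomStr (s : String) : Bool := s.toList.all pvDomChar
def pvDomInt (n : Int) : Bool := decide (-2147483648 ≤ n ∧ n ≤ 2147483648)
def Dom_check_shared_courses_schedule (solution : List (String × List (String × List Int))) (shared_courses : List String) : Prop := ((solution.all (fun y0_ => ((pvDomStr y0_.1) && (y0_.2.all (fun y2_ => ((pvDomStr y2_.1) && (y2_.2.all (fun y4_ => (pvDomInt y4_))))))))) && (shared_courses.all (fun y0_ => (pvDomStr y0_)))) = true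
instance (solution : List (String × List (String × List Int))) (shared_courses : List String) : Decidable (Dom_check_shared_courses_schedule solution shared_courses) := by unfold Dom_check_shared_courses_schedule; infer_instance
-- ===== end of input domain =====

-- B flattens the shared-course entries into one list and checks consistency by a
-- head-vs-rest pairwise recursion with no dict, instead of A's dict of first-seen
-- sets with a mid-scan early return (objective: alternative algorithm).

-- ===== PORT A =====
-- the inner 'for course_id, timeslots in courses_schedule' loop, carrying the dict; none = 'return False'
def pvAInner (shared_courses : List String)
    (d : PySem.Dict String (PySem.Set Int)) :
    List (String × List Int) → Option (PySem.Dict String (PySem.Set Int))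
  | [] => some d
  | (course_id, timeslots) :: rest =>
    if shared_courses.contains course_id then
      match d.get? course_id with
      | none => pvAInner shared_courses (d.insert course_id (PySem.Set.ofList timeslots)) rest
      | some s0 =>
        if PySem.Set.equal (PySem.Set.ofList timeslots) s0 then
          pvAInner shared_courses d rest
        else none
    else pvAInner shared_courses d rest

-- the outer 'for curriculum_id, courses_schedule in solution.items()' loop
def pvAOuter (shared_courses : List String)
    (d : PySem.Dict String (PySem.Set Int)) :
    List (String × List (String × List Int)) → Option (PySem.Dict String (PySem.Set Int))
  | [] => some d
  | (_, courses_schedule) :: rest =>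
    match pvAInner shared_courses d courses_schedule with
    | none => none
    | some d' => pvAOuter shared_courses d' rest

def check_shared_courses_schedule (solution : List (String × List (String × List Int))) (shared_courses : List String) : Bool :=
  (pvAOuter shared_courses PySem.Dict.empty solution).isSome

-- ===== PORT B =====
-- the flattening comprehension of Source B: one (course_id, set(timeslots)) entry per shared occurrence
def pvEntries (solution : List (String × List (String × List Int))) (shared_courses : List String) : List (String × PySem.Set Int) :=
  solution.flatMap (fun cur =>
    cur.2.filterMap (fun q =>
      if shared_courses.contains q.1 then some (q.1, PySem.Set.ofList q.2) else none))

-- _consistent: entries[0] / entries[1:] is the structural head/tail split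
def pvConsistent : List (String × PySem.Set Int) → Bool
  | [] => true
  | (c0, s0) :: rest =>
    rest.all (fun p => (p.1 != c0) || PySem.Set.equal p.2 s0) && pvConsistent rest

def check_shared_courses_schedule_alt (solution : List (String × List (String × List Int))) (shared_courses : List String) : Bool :=
  pvConsistent (pvEntries solution shared_courses)

-- ===== PRECONDITION & SPEC =====
def Spec_check_shared_courses_schedule (solution : List (String × List (String × List Int))) (shared_courses : List String) (out : Bool) : Prop := out = check_shared_courses_schedule_alt solution shared_courses
instance (solution : List (String × List (String × List Int))) (shared_courses : List String) (out : Bool) : Decidable (Spec_check_shared_courses_schedule solution shared_courses out) := by unfold Spec_check_shared_courses_schedule; infer_instance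

-- ===== CLAIM (what is proved, stated in full; the proofs are below) =====
def Claim_equal_check_shared_courses_schedule : Prop := ∀ (solution : List (String × List (String × List Int))) (shared_courses : List String), Dom_check_shared_courses_schedule solution shared_courses → Spec_check_shared_courses_schedule solution shared_courses (check_shared_courses_schedule solution shared_courses)

-- ===== LEMMAS AND PROOFS =====

-- the flattened (course_id, set-of-timeslots) stream of shared-course entries
def pvFilt (shared_courses : List String) (P : List (String × List Int)) : List (String × PySem.Set Int) :=
  P.filterMap (fun q => if shared_courses.contains q.1 then some (q.1, PySem.Set.ofList q.2) else none)

-- A's dict loop on the flattened stream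
def pvGoL (d : PySem.Dict String (PySem.Set Int)) :
    List (String × PySem.Set Int) → Option (PySem.Dict String (PySem.Set Int))
  | [] => some d
  | (c, s) :: rest =>
    match d.get? c with
    | none => pvGoL (d.insert c s) rest
    | some s0 => if PySem.Set.equal s s0 then pvGoL d rest else none

-- value of the first occurrence of key c in L
def pvFv (L : List (String × PySem.Set Int)) (c : String) : PySem.Set Int :=
  ((L.find? (fun q => q.1 == c)).map (·.2)).getD PySem.Set.empty

theorem pv_bool_ext (a b : Bool) (h : a = true ↔ b = true) : a = b := by
  cases a <;> cases b <;> simp_all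

theorem pv_equal_refl (s : PySem.Set Int) : PySem.Set.equal s s = true := by
  rw [PySem.Set.equal_iff]; intro x; rfl

theorem pv_equal_symm (s t : PySem.Set Int) (h : PySem.Set.equal s t = true) :
    PySem.Set.equal t s = true := by
  rw [PySem.Set.equal_iff] at h ⊢; intro x; exact (h x).symm

theorem pv_equal_trans (s t u : PySem.Set Int)
    (h1 : PySem.Set.equal s t = true) (h2 : PySem.Set.equal t u = true) :
    PySem.Set.equal s u = true := by
  rw [PySem.Set.equal_iff] at h1 h2 ⊢; intro x; exact (h1 x).trans (h2 x)

theorem pv_all_congr {α : Type} (L : List α) (f g : α → Bool)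
    (h : ∀ p ∈ L, f p = g p) : L.all f = L.all g := by
  induction L with
  | nil => rfl
  | cons x xs ih =>
    simp only [List.all_cons, h x (by simp)]
    rw [ih (fun p hp => h p (by simp [hp]))]

theorem pvAInner_eq_goL (shared_courses : List String) (P : List (String × List Int))
    (d : PySem.Dict String (PySem.Set Int)) :
    pvAInner shared_courses d P = pvGoL d (pvFilt shared_courses P) := by
  induction P generalizing d with
  | nil => rfl
  | cons q rest ih =>
    obtain ⟨c, ts⟩ := q
    by_cases hc : shared_courses.contains c
    · simp only [pvAInner, pvFilt, List.filterMap_cons, hc, if_pos, pvGoL]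
      cases d.get? c with
      | none => simpa [pvGoL, pvFilt] using ih _
      | some s0 =>
        by_cases he : PySem.Set.equal (PySem.Set.ofList ts) s0 = true
        · simpa [pvGoL, pvFilt, he] using ih d
        · simp [he]
    · simp only [pvAInner, pvFilt, List.filterMap_cons, hc]
      simpa [pvFilt] using ih d

theorem pvGoL_append (L1 L2 : List (String × PySem.Set Int)) (d : PySem.Dict String (PySem.Set Int)) :
    pvGoL d (L1 ++ L2) = match pvGoL d L1 with
      | none => none
      | some d' => pvGoL d' L2 := by
  induction L1 generalizing d with
  | nil => rfl
  | cons p rest ih =>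
    obtain ⟨c, s⟩ := p
    simp only [List.cons_append, pvGoL]
    cases d.get? c with
    | none => exact ih _
    | some s0 =>
      by_cases he : PySem.Set.equal s s0 = true
      · simp only [he, if_pos]; exact ih d
      · simp [he]

theorem pvAOuter_eq_goL (shared_courses : List String)
    (sol : List (String × List (String × List Int)))
    (d : PySem.Dict String (PySem.Set Int)) :
    pvAOuter shared_courses d sol = pvGoL d (pvFilt shared_courses (sol.flatMap (·.2))) := by
  induction sol generalizing d with
  | nil => rfl
  | cons x rest ih =>
    obtain ⟨cur, cs⟩ := x
    have hsplit : pvFilt shared_courses (cs ++ rest.flatMap (·.2))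
        = pvFilt shared_courses cs ++ pvFilt shared_courses (rest.flatMap (·.2)) := by
      simp [pvFilt, List.filterMap_append]
    simp only [pvAOuter, List.flatMap_cons, hsplit, pvGoL_append, pvAInner_eq_goL]
    cases pvGoL d (pvFilt shared_courses cs) with
    | none => rfl
    | some d' => exact ih d'

theorem pvFv_cons_self (c : String) (s : PySem.Set Int) (L : List (String × PySem.Set Int)) :
    pvFv ((c, s) :: L) c = s := by
  simp [pvFv]

theorem pvFv_cons_ne (c c' : String) (s : PySem.Set Int) (L : List (String × PySem.Set Int))
    (h : c' ≠ c) : pvFv ((c, s) :: L) c' = pvFv L c' := by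
  have : (c == c') = false := by simp [Ne.symm h]
  simp [pvFv, this]

-- characterization of A's loop: succeeds iff every entry matches its reference set
theorem pvGoL_char (L : List (String × PySem.Set Int)) (d : PySem.Dict String (PySem.Set Int)) :
    (pvGoL d L).isSome = L.all (fun p => PySem.Set.equal p.2 ((d.get? p.1).getD (pvFv L p.1))) := by
  induction L generalizing d with
  | nil => simp [pvGoL]
  | cons p L ih =>
    obtain ⟨c, s⟩ := p
    cases h : d.get? c with
    | none =>
      have hred : pvGoL d ((c, s) :: L) = pvGoL (d.insert c s) L := by simp [pvGoL, h]
      rw [hred, ih]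
      have hstep : ∀ p ∈ L,
          (PySem.Set.equal p.2 (((d.insert c s).get? p.1).getD (pvFv L p.1)))
          = (PySem.Set.equal p.2 ((d.get? p.1).getD (pvFv ((c, s) :: L) p.1))) := by
        intro p _
        by_cases hpc : p.1 = c
        · rw [hpc, PySem.Dict.get?_insert_self, h, pvFv_cons_self]; simp
        · rw [PySem.Dict.get?_insert, if_neg hpc, pvFv_cons_ne _ _ _ _ hpc]
      rw [pv_all_congr _ _ _ hstep]
      have hhead : PySem.Set.equal s ((d.get? c).getD (pvFv ((c, s) :: L) c)) = true := by
        rw [h, pvFv_cons_self]; exact pv_equal_refl s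
      simp [List.all_cons, hhead]
    | some s0 =>
      have hred : pvGoL d ((c, s) :: L)
          = if PySem.Set.equal s s0 = true then pvGoL d L else none := by simp [pvGoL, h]
      have hstep : ∀ p ∈ L,
          (PySem.Set.equal p.2 ((d.get? p.1).getD (pvFv L p.1)))
          = (PySem.Set.equal p.2 ((d.get? p.1).getD (pvFv ((c, s) :: L) p.1))) := by
        intro p _
        by_cases hpc : p.1 = c
        · rw [hpc, h]; simp
        · rw [pvFv_cons_ne _ _ _ _ hpc]
      by_cases he : PySem.Set.equal s s0 = true
      · rw [hred, if_pos he, ih, pv_all_congr _ _ _ hstep]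
        simp [List.all_cons, h, he]
      · rw [hred, if_neg he]
        have hf : PySem.Set.equal s s0 = false := by
          cases hq : PySem.Set.equal s s0 with
          | false => rfl
          | true => exact absurd hq he
        simp [List.all_cons, h, hf]

-- B's flattening comprehension equals the filterMap of the flattened schedule stream
theorem pvEntries_eq_filt (shared_courses : List String)
    (sol : List (String × List (String × List Int))) :
    pvEntries sol shared_courses = pvFilt shared_courses (sol.flatMap (·.2)) := by
  induction sol with
  | nil => rfl
  | cons x rest ih =>
    simp only [pvEntries, pvFilt, List.flatMap_cons, List.filterMap_append] at *
    rw [ih]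

-- core: B's head-vs-rest pairwise recursion = A's check-against-first-occurrence
theorem pvConsistent_char (L : List (String × PySem.Set Int)) :
    pvConsistent L = L.all (fun p => PySem.Set.equal p.2 (pvFv L p.1)) := by
  induction L with
  | nil => rfl
  | cons q rest ih =>
    obtain ⟨c0, s0⟩ := q
    have hhead : PySem.Set.equal s0 (pvFv ((c0, s0) :: rest) c0) = true := by
      rw [pvFv_cons_self]; exact pv_equal_refl s0
    simp only [pvConsistent, List.all_cons, hhead, Bool.true_and, ih]
    apply pv_bool_ext
    simp only [Bool.and_eq_true, List.all_eq_true, Bool.or_eq_true, bne_iff_ne, ne_eq]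
    constructor
    · rintro ⟨h1, h2⟩ p hp
      by_cases hpc : p.1 = c0
      · rw [hpc, pvFv_cons_self]
        rcases h1 p hp with hne | heq
        · exact absurd hpc hne
        · exact heq
      · rw [pvFv_cons_ne _ _ _ _ hpc]
        exact h2 p hp
    · intro h
      constructor
      · intro p hp
        by_cases hpc : p.1 = c0
        · right
          have := h p hp
          rwa [hpc, pvFv_cons_self] at this
        · left; exact hpc
      · intro p hp
        by_cases hpc : p.1 = c0
        · -- p's set equals s0; the first c0-entry of rest also equals s0; chain them
          have hps0 : PySem.Set.equal p.2 s0 = true := by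
            have := h p hp
            rwa [hpc, pvFv_cons_self] at this
          have hfind : (rest.find? (fun r => r.1 == c0)).isSome := by
            rw [List.find?_isSome]
            exact ⟨p, hp, by simp [hpc]⟩
          obtain ⟨r, hr⟩ := Option.isSome_iff_exists.mp hfind
          have hrmem : r ∈ rest := List.mem_of_find?_eq_some hr
          have hrc : r.1 = c0 := by
            have := List.find?_some hr
            simpa using this
          have hrs0 : PySem.Set.equal r.2 s0 = true := by
            have := h r hrmem
            rwa [hrc, pvFv_cons_self] at this
          have hfv : pvFv rest c0 = r.2 := by
            simp [pvFv, hr]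
          rw [hpc, hfv]
          exact pv_equal_trans _ _ _ hps0 (pv_equal_symm _ _ hrs0)
        · rw [← pvFv_cons_ne c0 p.1 s0 rest hpc]
          exact h p hp

-- ===== VERDICT (by name: the statement is the Claim_ definition above) =====
theorem check_shared_courses_schedule_spec : Claim_equal_check_shared_courses_schedule := by
  intro sol sc _
  unfold Spec_check_shared_courses_schedule
  simp only [check_shared_courses_schedule, check_shared_courses_schedule_alt]
  rw [pvAOuter_eq_goL, pvGoL_char, pvEntries_eq_filt, pvConsistent_char]
  apply pv_all_congr
  intro p _
  simp [PySem.Dict.get?_empty]
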